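-- pv_equiv track=rewrite | github.com/Evandabest/Mindfold | Flask-backend/Generators/Bridgesgen.py | _build_visibility_edges
-- ===== SOURCE A (Python) =====
-- from typing import Dict, List, Optional, Tuple, Set
--
-- Coord = Tuple[int, int]          # (r, c) on lattice points
--
-- def _build_visibility_edges(points: List[Coord]) -> List[Tuple[int, int]]:
--     """
--     Returns all pairs (u,v) that can be connected:
--     - share a row or col
--     - no other node between them on that line
--     """
--     n = len(points)
--     by_row: Dict[int, List[Tuple[int, int]]] = {}
--     by_col: Dict[int, List[Tuple[int, int]]] = {}
--
--     for i, (r, c) in enumerate(points):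
--         by_row.setdefault(r, []).append((c, i))
--         by_col.setdefault(c, []).append((r, i))
--
--     edges: List[Tuple[int, int]] = []
--
--     # adjacent along sorted row list
--     for r, lst in by_row.items():
--         lst.sort()
--         for k in range(len(lst) - 1):
--             _, u = lst[k]
--             _, v = lst[k + 1]
--             edges.append((min(u, v), max(u, v)))
--
--     # adjacent along sorted col list
--     for c, lst in by_col.items():
--         lst.sort()
--         for k in range(len(lst) - 1):
--             _, u = lst[k]
--             _, v = lst[k + 1]
--             edges.append((min(u, v), max(u, v)))
--
--     # dedupe
--     return sorted(set(edges))
-- ===== SOURCE B (Python) =====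
-- from typing import List, Tuple
--
-- Coord = Tuple[int, int]
--
-- def _build_visibility_edges(points: List[Coord]) -> List[Tuple[int, int]]:
--     """
--     Returns all pairs (u,v) that can be connected:
--     - share a row or col
--     - no other node between them on that line
--     One global sort per axis instead of per-key dict buckets: sort the
--     (r, c, i) triples, link consecutive triples sharing r; then sort the
--     (c, r, i) triples and link consecutive triples sharing c.
--     """
--     rows = sorted((r, c, i) for i, (r, c) in enumerate(points))
--     cols = sorted((c, r, i) for i, (r, c) in enumerate(points))
--     edges = set()
--     for triples in (rows, cols):
--         for k in range(len(triples) - 1):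
--             a, u = triples[k][0], triples[k][2]
--             b, v = triples[k + 1][0], triples[k + 1][2]
--             if a == b:
--                 edges.add((min(u, v), max(u, v)))
--     return sorted(edges)
-- ===== Notes on version B (the rewrite author's own statement) =====
-- stated objective: alternative
-- what changed: A groups points into per-row/per-column dict buckets (setdefault+append), sorts each bucket and links neighbours; B drops the dicts entirely: it sorts the (r,c,i) triples once per axis globally and links consecutive triples that share the axis coordinate, detecting bucket boundaries by coordinate change during a linear scan.
import Mathlib
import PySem

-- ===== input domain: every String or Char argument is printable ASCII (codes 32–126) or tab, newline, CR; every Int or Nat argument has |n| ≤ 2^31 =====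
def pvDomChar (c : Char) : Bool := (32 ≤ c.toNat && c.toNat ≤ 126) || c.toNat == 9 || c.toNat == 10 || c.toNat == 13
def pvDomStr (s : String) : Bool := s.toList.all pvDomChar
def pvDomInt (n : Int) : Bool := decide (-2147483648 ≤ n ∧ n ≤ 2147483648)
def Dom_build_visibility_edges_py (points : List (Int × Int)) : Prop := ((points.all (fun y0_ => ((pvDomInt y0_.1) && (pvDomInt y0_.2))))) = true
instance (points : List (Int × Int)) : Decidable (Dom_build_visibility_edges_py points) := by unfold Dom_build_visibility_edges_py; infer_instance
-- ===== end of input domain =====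

-- B replaces A's per-key dict buckets by one global lexicographic sort per axis plus a
-- linear scan linking consecutive triples that share the axis coordinate (objective: alternative decomposition).

-- ===== PORT A =====
-- by_row/by_col are dicts Int → List (c-or-r, i); setdefault(k,[]).append(x) = modify k [] (· ++ [x]).
def build_visibility_edges_py (points : List (Int × Int)) : List (Int × Int) :=
  let by_row : PySem.Dict Int (List (Int × Int)) :=
    (PySem.List.enumerate points).foldl
      (fun d p => d.modify p.2.1 [] (· ++ [(p.2.2, p.1)])) PySem.Dict.empty
  let by_col : PySem.Dict Int (List (Int × Int)) :=
    (PySem.List.enumerate points).foldl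
      (fun d p => d.modify p.2.2 [] (· ++ [(p.2.1, p.1)])) PySem.Dict.empty
  -- adjacent along sorted row list (tuple comparison = lexicographic, via toLex)
  let edges1 : List (Int × Int) :=
    by_row.items.foldl (fun es kv =>
      let lst := PySem.List.sorted kv.2 (fun q : Int × Int => toLex q) false
      (PySem.List.pyRange 0 ((lst.length : Int) - 1) 1).foldl (fun es2 k =>
        let u := (PySem.List.pyGetD lst k (0, 0)).2
        let v := (PySem.List.pyGetD lst (k + 1) (0, 0)).2
        es2 ++ [(min u v, max u v)]) es) []
  -- adjacent along sorted col list
  let edges2 : List (Int × Int) :=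
    by_col.items.foldl (fun es kv =>
      let lst := PySem.List.sorted kv.2 (fun q : Int × Int => toLex q) false
      (PySem.List.pyRange 0 ((lst.length : Int) - 1) 1).foldl (fun es2 k =>
        let u := (PySem.List.pyGetD lst k (0, 0)).2
        let v := (PySem.List.pyGetD lst (k + 1) (0, 0)).2
        es2 ++ [(min u v, max u v)]) es) edges1
  -- dedupe: sorted(set(edges))
  PySem.List.sorted (PySem.Set.ofList edges2) (fun e : Int × Int => toLex e) false

-- ===== PORT B =====
-- the inner scan of Source B: link consecutive triples sharing the first coordinate
def bScanVis (triples : List (Int × Int × Int)) (edges : PySem.Set (Int × Int)) : PySem.Set (Int × Int) :=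
  (PySem.List.pyRange 0 ((triples.length : Int) - 1) 1).foldl (fun es k =>
    let t1 := PySem.List.pyGetD triples k (0, 0, 0)
    let t2 := PySem.List.pyGetD triples (k + 1) (0, 0, 0)
    if t1.1 = t2.1 then PySem.Set.add es (min t1.2.2 t2.2.2, max t1.2.2 t2.2.2) else es) edges

def build_visibility_edges_py_alt (points : List (Int × Int)) : List (Int × Int) :=
  let rows := PySem.List.sorted ((PySem.List.enumerate points).map (fun p => (p.2.1, p.2.2, p.1)))
      (fun t : Int × Int × Int => toLex (t.1, toLex t.2)) false
  let cols := PySem.List.sorted ((PySem.List.enumerate points).map (fun p => (p.2.2, p.2.1, p.1)))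
      (fun t : Int × Int × Int => toLex (t.1, toLex t.2)) false
  PySem.List.sorted (bScanVis cols (bScanVis rows PySem.Set.empty)) (fun e : Int × Int => toLex e) false

-- ===== PRECONDITION & SPEC =====
def Spec_build_visibility_edges_py (points : List (Int × Int)) (out : List (Int × Int)) : Prop := out = build_visibility_edges_py_alt points
instance (points : List (Int × Int)) (out : List (Int × Int)) : Decidable (Spec_build_visibility_edges_py points out) := by unfold Spec_build_visibility_edges_py; infer_instance

-- ===== CLAIM (what is proved, stated in full; the proofs are below) =====
def Claim_equal_build_visibility_edges_py : Prop := ∀ (points : List (Int × Int)), Dom_build_visibility_edges_py points → Spec_build_visibility_edges_py points (build_visibility_edges_py points)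

-- ===== LEMMAS AND PROOFS =====

-- proof-side vocabulary
def pvLex2 (q : Int × Int) : Lex (Int × Int) := toLex q

def pvLex3 (t : Int × Int × Int) : Lex (Int × Lex (Int × Int)) := toLex (t.1, toLex t.2)

def pvEdge (a b : Int × Int) : Int × Int := (min a.2 b.2, max a.2 b.2)

def pvCp {α : Type} (xs : List α) : List (α × α) := xs.zip xs.tail

def pvBucket (l : List (Int × Int × Int)) (k : Int) : List (Int × Int) :=
  (l.filter (fun t => t.1 == k)).map (·.2)

def pvSB (l : List (Int × Int × Int)) (k : Int) : List (Int × Int) :=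
  PySem.List.sorted (pvBucket l k) pvLex2 false

-- the bucket with its key reattached is the filter itself

def pvScanList (ts : List (Int × Int × Int)) : List (Int × Int) :=
  ((pvCp ts).filter (fun pr => pr.1.1 == pr.2.1)).map (fun pr => pvEdge pr.1.2 pr.2.2)

def pvAxisEdges (ks : List Int) (l : List (Int × Int × Int)) : List (Int × Int) :=
  ks.flatMap (fun k => (pvCp (pvSB l k)).map (fun pr => pvEdge pr.1 pr.2))

theorem pv_aux {α β : Type} (g : β → α → α → β) (d : α) :
    ∀ (xs : List α) (init : β),
    (List.range (xs.length - 1)).foldl (fun acc k => g acc (xs.getD k d) (xs.getD (k+1) d)) init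
    = (pvCp xs).foldl (fun acc pr => g acc pr.1 pr.2) init
  | [], init => by simp [pvCp]
  | [x], init => by simp [pvCp]
  | x :: y :: t, init => by
      have ih := pv_aux g d (y :: t) (g init x y)
      simp only [List.length_cons, Nat.add_sub_cancel, List.range_succ_eq_map,
        List.foldl_cons, List.foldl_map, List.getD_cons_zero, List.getD_cons_succ] at *
      simpa [pvCp] using ih

theorem pv_foldl_consec {α β : Type} (xs : List α) (d : α) (g : β → α → α → β) (init : β) :
    (PySem.List.pyRange 0 ((xs.length : Int) - 1) 1).foldl
      (fun acc k => g acc (PySem.List.pyGetD xs k d) (PySem.List.pyGetD xs (k + 1) d)) init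
    = (pvCp xs).foldl (fun acc pr => g acc pr.1 pr.2) init := by
  rw [PySem.List.pyRange_one, List.foldl_map]
  have h1 : ((xs.length : Int) - 1 - 0).toNat = xs.length - 1 := by omega
  rw [h1, ← pv_aux g d xs init]
  apply List.foldl_ext
  intro acc k hk
  simp only [zero_add]
  rw [show ((k:Int) + 1) = ((k+1:Nat) : Int) by push_cast; ring]
  simp only [PySem.List.pyGetD_natCast]

theorem pv_bScanVis_eq (ts : List (Int × Int × Int)) (es : PySem.Set (Int × Int)) :
    bScanVis ts es = PySem.Set.update es (pvScanList ts) := by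
  unfold bScanVis pvScanList
  rw [pv_foldl_consec ts (0,0,0)
    (fun es t1 t2 => if t1.1 = t2.1 then PySem.Set.add es (min t1.2.2 t2.2.2, max t1.2.2 t2.2.2) else es) es]
  rw [PySem.Set.update_map_eq_foldl_add, List.foldl_filter]
  apply List.foldl_ext
  intro acc pr _
  by_cases h : pr.1.1 = pr.2.1 <;> simp [h, pvEdge]

theorem pv_partition_perm : ∀ (ks : List Int) (l : List (Int × Int × Int)),
    ks.Nodup → (∀ t ∈ l, t.1 ∈ ks) →
    (ks.flatMap (fun k => l.filter (fun t => t.1 == k))).Perm l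
  | [], l, _, hcov => by
      have : l = [] := List.eq_nil_iff_forall_not_mem.2 (fun t ht => by simpa using hcov t ht)
      simp [this]
  | k :: ks, l, hnd, hcov => by
      have hk : k ∉ ks := (List.nodup_cons.1 hnd).1
      have hnd' : ks.Nodup := (List.nodup_cons.1 hnd).2
      have hcov' : ∀ t ∈ l.filter (fun t => !(t.1 == k)), t.1 ∈ ks := by
        intro t ht
        rw [List.mem_filter] at ht
        have := hcov t ht.1
        simp at ht
        rcases List.mem_cons.1 this with h | h
        · exact absurd h ht.2
        · exact h
      have ih := pv_partition_perm ks (l.filter (fun t => !(t.1 == k))) hnd' hcov'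
      have hre : ∀ k' ∈ ks, l.filter (fun t => t.1 == k')
          = (l.filter (fun t => !(t.1 == k))).filter (fun t => t.1 == k') := by
        intro k' hk'
        rw [List.filter_filter]
        apply List.filter_congr
        intro t _
        by_cases h : t.1 = k'
        · have : t.1 ≠ k := by rintro rfl; exact hk (h ▸ hk')
          simp [h]
          exact fun e => this (h.trans e)
        · simp [h]
      refine List.Perm.trans ?_ (List.filter_append_perm (fun t => t.1 == k) l)
      rw [List.flatMap_cons, List.flatMap_congr hre]
      exact ih.append_left _

theorem pv_bucket_attach (l : List (Int × Int × Int)) (k : Int) :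
    (pvBucket l k).map (fun q => (k, q)) = l.filter (fun t => t.1 == k) := by
  unfold pvBucket
  rw [List.map_map]
  have : ∀ t ∈ l.filter (fun t => t.1 == k), ((fun q => (k, q)) ∘ (·.2)) t = id t := by
    intro t ht
    have := (List.mem_filter.1 ht).2
    simp at this
    simp [Function.comp, ← this]
  rw [List.map_congr_left this, List.map_id]

-- sorted bucket keeps distinct indices

theorem pv_sb_snd_nodup (l : List (Int × Int × Int)) (hnd : (l.map (·.2.2)).Nodup) (k : Int) :
    ((pvSB l k).map (·.2)).Nodup := by
  have h1 : ((pvBucket l k).map (·.2)).Nodup := by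
    unfold pvBucket
    rw [List.map_map]
    have : ((l.filter (fun t => t.1 == k)).map (fun t => t.2.2)).Sublist (l.map (·.2.2)) :=
      List.Sublist.map _ List.filter_sublist
    exact hnd.sublist this
  exact ((PySem.List.sorted_perm (pvBucket l k) pvLex2 false).map (·.2)).nodup_iff.2 h1

-- sorted bucket is strictly increasing under pvLex2

theorem pv_sb_pairwise_lt (l : List (Int × Int × Int)) (hnd : (l.map (·.2.2)).Nodup) (k : Int) :
    (pvSB l k).Pairwise (fun a b => pvLex2 a < pvLex2 b) := by
  have hle : (pvSB l k).Pairwise (fun a b => pvLex2 a ≤ pvLex2 b) :=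
    PySem.List.sorted_pairwise (pvBucket l k) pvLex2
  have hne : (pvSB l k).Pairwise (fun a b => a.2 ≠ b.2) :=
    List.pairwise_map.1 (pv_sb_snd_nodup l hnd k)
  refine (hle.and hne).imp ?_
  rintro a b ⟨h1, h2⟩
  rcases Prod.Lex.le_iff.1 h1 with h | ⟨h3, h4⟩
  · exact Prod.Lex.lt_iff.2 (Or.inl h)
  · exact Prod.Lex.lt_iff.2 (Or.inr ⟨h3, lt_of_le_of_ne h4 h2⟩)

theorem pv_sorted_structure (l : List (Int × Int × Int))
    (hnd : (l.map (·.2.2)).Nodup) :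
    PySem.List.sorted l pvLex3 false
      = (PySem.List.sorted (PySem.Set.ofList (l.map (·.1))) (fun x => x) false).flatMap
          (fun k => (pvSB l k).map (fun q => (k, q))) := by
  set ks := PySem.List.sorted (PySem.Set.ofList (l.map (·.1))) (fun x => x) false with hks
  apply PySem.List.sorted_eq_of_perm_of_pairwise_lt
  · -- permutation
    have h1 : ∀ k ∈ ks, ((pvSB l k).map (fun q => (k, q))).Perm (l.filter (fun t => t.1 == k)) := by
      intro k _
      rw [← pv_bucket_attach l k]
      exact (PySem.List.sorted_perm (pvBucket l k) pvLex2 false).map _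
    refine (List.Perm.flatMap_left ks h1).trans ?_
    refine ((PySem.List.sorted_perm _ _ _).flatMap_right _).trans ?_
    apply pv_partition_perm
    · exact PySem.Set.nodup_ofList _
    · intro t ht
      rw [PySem.Set.mem_ofList]
      exact List.mem_map_of_mem ht
  · -- strictly increasing
    rw [List.flatMap_def, List.pairwise_flatten]
    constructor
    · intro blk hblk
      rw [List.mem_map] at hblk
      obtain ⟨k, _, rfl⟩ := hblk
      rw [List.pairwise_map]
      refine (pv_sb_pairwise_lt l hnd k).imp ?_
      intro a b h
      exact Prod.Lex.lt_iff.2 (Or.inr ⟨rfl, h⟩)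
    · have hks_lt : ks.Pairwise (· < ·) := PySem.List.sorted_ofList_pairwise_lt _
      rw [List.pairwise_map]
      refine hks_lt.imp ?_
      intro k k' hkk x hx y hy
      rw [List.mem_map] at hx hy
      obtain ⟨q, _, rfl⟩ := hx
      obtain ⟨q', _, rfl⟩ := hy
      exact Prod.Lex.lt_iff.2 (Or.inl hkk)

theorem pv_cp_append {α : Type} : ∀ (xs ys : List α) (hx : xs ≠ []) (hy : ys ≠ []),
    pvCp (xs ++ ys) = pvCp xs ++ (xs.getLast hx, ys.head hy) :: pvCp ys
  | [], _, hx, _ => absurd rfl hx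
  | [x], ys, _, hy => by
      cases ys with
      | nil => exact absurd rfl hy
      | cons y t => simp [pvCp]
  | x1 :: x2 :: t, ys, hx, hy => by
      have ih := pv_cp_append (x2 :: t) ys (by simp) hy
      simp only [pvCp, List.cons_append, List.zip_cons_cons, List.tail_cons] at *
      rw [ih]
      simp [List.getLast_cons]

-- cp of a mapped list

theorem pv_cp_map {α β : Type} (f : α → β) (s : List α) :
    pvCp (s.map f) = (pvCp s).map (fun pr => (f pr.1, f pr.2)) := by
  unfold pvCp
  rw [← List.map_tail, List.zip_map]
  simp [Prod.map]

-- the scan of one block keeps all of its consecutive pairs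

theorem pv_scan_block (l : List (Int × Int × Int)) (k : Int) :
    pvScanList ((pvSB l k).map (fun q => (k, q)))
      = (pvCp (pvSB l k)).map (fun pr => pvEdge pr.1 pr.2) := by
  unfold pvScanList
  rw [pv_cp_map, List.filter_map]
  have : ∀ pr ∈ pvCp (pvSB l k),
      ((fun pr : (Int × Int × Int) × (Int × Int × Int) => pr.1.1 == pr.2.1) ∘
        (fun pr : (Int × Int) × (Int × Int) => ((k, pr.1), (k, pr.2)))) pr = true := by
    intro pr _; simp
  rw [List.filter_congr this, List.filter_true, List.map_map]
  rfl

theorem pv_scan_blocks (l : List (Int × Int × Int)) : ∀ (ks : List Int),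
    (∀ k ∈ ks, pvSB l k ≠ []) → ks.Pairwise (· < ·) →
    pvScanList (ks.flatMap (fun k => (pvSB l k).map (fun q => (k, q))))
      = pvAxisEdges ks l
  | [], _, _ => rfl
  | k :: ks, hne, hlt => by
      have hlt' := (List.pairwise_cons.1 hlt).2
      have hkall := (List.pairwise_cons.1 hlt).1
      have ih := pv_scan_blocks l ks (fun k' h => hne k' (List.mem_cons_of_mem _ h)) hlt'
      rw [List.flatMap_cons]
      by_cases hrest : ks.flatMap (fun k => (pvSB l k).map (fun q => (k, q))) = []
      · rw [hrest, List.append_nil]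
        unfold pvAxisEdges at ih ⊢
        rw [List.flatMap_cons, ← ih, hrest]
        simp only [show pvScanList ([] : List (Int × Int × Int)) = [] from rfl, List.append_nil]
        exact pv_scan_block l k
      · have hblk : (pvSB l k).map (fun q => (k, q)) ≠ [] := by
          simp [hne k (List.mem_cons_self)]
        set rest := ks.flatMap (fun k => (pvSB l k).map (fun q => (k, q))) with hrdef
        -- boundary pair key mismatch
        have hlast : (((pvSB l k).map (fun q => (k, q))).getLast hblk).1 = k := by
          have hm := List.getLast_mem hblk
          rw [List.mem_map] at hm
          obtain ⟨q, _, hq⟩ := hm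
          rw [← hq]
        have hhead : (rest.head hrest).1 ≠ k := by
          have hall : ∀ x ∈ rest, x.1 ≠ k := by
            intro x hx
            rw [hrdef, List.mem_flatMap] at hx
            obtain ⟨k', hk', hmem⟩ := hx
            rw [List.mem_map] at hmem
            obtain ⟨q, _, hq⟩ := hmem
            rw [← hq]
            exact fun h => absurd (h ▸ hkall k' hk') (lt_irrefl k)
          exact hall _ (List.head_mem hrest)
        have hbd : ¬ ((fun pr : (Int × Int × Int) × (Int × Int × Int) => pr.1.1 == pr.2.1)
            ((((pvSB l k).map (fun q => (k, q))).getLast hblk), rest.head hrest) = true) := by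
          show ¬ (((((pvSB l k).map (fun q => (k, q))).getLast hblk).1 == (rest.head hrest).1) = true)
          intro h
          rw [beq_iff_eq] at h
          exact hhead (h ▸ hlast)
        unfold pvScanList
        rw [pv_cp_append _ _ hblk hrest, List.filter_append,
          List.filter_cons_of_neg (p := fun pr : (Int × Int × Int) × (Int × Int × Int) => pr.1.1 == pr.2.1) (pa := hbd)]
        rw [List.map_append]
        have h1 : ((pvCp ((pvSB l k).map (fun q => (k, q)))).filter
              (fun pr => pr.1.1 == pr.2.1)).map (fun pr => pvEdge pr.1.2 pr.2.2)
            = (pvCp (pvSB l k)).map (fun pr => pvEdge pr.1 pr.2) := pv_scan_block l k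
        rw [h1]
        unfold pvAxisEdges
        rw [List.flatMap_cons,
          show (List.map (fun pr => pvEdge pr.1.2 pr.2.2)
              (List.filter (fun pr => pr.1.1 == pr.2.1) (pvCp rest))) = pvScanList rest from rfl,
          ih]
        rfl

theorem pv_axisA (l : List (Int × Int × Int)) (es : List (Int × Int)) :
    ((l.foldl (fun d t => d.modify t.1 [] (· ++ [t.2])) PySem.Dict.empty :
        PySem.Dict Int (List (Int × Int))).items).foldl (fun es kv =>
      let lst := PySem.List.sorted kv.2 (fun q : Int × Int => toLex q) false
      (PySem.List.pyRange 0 ((lst.length : Int) - 1) 1).foldl (fun es2 k =>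
        let u := (PySem.List.pyGetD lst k (0, 0)).2
        let v := (PySem.List.pyGetD lst (k + 1) (0, 0)).2
        es2 ++ [(min u v, max u v)]) es) es
    = es ++ pvAxisEdges (PySem.Set.ofList (l.map (·.1))) l := by
  have hkeys : (l.foldl (fun d t => d.modify t.1 [] (· ++ [t.2])) PySem.Dict.empty :
      PySem.Dict Int (List (Int × Int))).keys = PySem.Set.ofList (l.map (·.1)) := by
    have h := PySem.Dict.keys_foldl_modify_key l (·.1) ([] : List (Int × Int))
      (fun _ t => (· ++ [t.2])) PySem.Dict.empty
    simpa [PySem.Set.update_nil_left] using h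
  have hnodup : (l.foldl (fun d t => d.modify t.1 [] (· ++ [t.2])) PySem.Dict.empty :
      PySem.Dict Int (List (Int × Int))).keys.Nodup := by
    rw [hkeys]; exact PySem.Set.nodup_ofList _
  have hgetD : ∀ k, (l.foldl (fun d t => d.modify t.1 [] (· ++ [t.2])) PySem.Dict.empty :
      PySem.Dict Int (List (Int × Int))).getD k [] = pvBucket l k := by
    intro k
    have h := PySem.Dict.getD_foldl_modify_append l PySem.Dict.empty k
    simpa [pvBucket] using h
  have hitems := PySem.Dict.items_eq_map_keys _ hnodup ([] : List (Int × Int))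
  rw [hitems, hkeys]
  -- inner loop: index fold = consecutive-pair fold, then append fold = flatMap
  have hinner : ∀ (es0 : List (Int × Int)) (kv : Int × List (Int × Int)),
      (let lst := PySem.List.sorted kv.2 (fun q : Int × Int => toLex q) false
       (PySem.List.pyRange 0 ((lst.length : Int) - 1) 1).foldl (fun es2 k =>
        let u := (PySem.List.pyGetD lst k (0, 0)).2
        let v := (PySem.List.pyGetD lst (k + 1) (0, 0)).2
        es2 ++ [(min u v, max u v)]) es0)
      = es0 ++ (pvCp (PySem.List.sorted kv.2 pvLex2 false)).map (fun pr => pvEdge pr.1 pr.2) := by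
    intro es0 kv
    show (PySem.List.pyRange 0 _ 1).foldl _ es0 = _
    rw [pv_foldl_consec (PySem.List.sorted kv.2 (fun q : Int × Int => toLex q) false) (0, 0)
      (fun acc a b => acc ++ [(min a.2 b.2, max a.2 b.2)]) es0]
    rw [PySem.List.foldl_append_singleton_eq_map (fun pr : (Int × Int) × (Int × Int) =>
      ((min pr.1.2 pr.2.2, max pr.1.2 pr.2.2) : Int × Int))]
    rfl
  calc ((PySem.Set.ofList (l.map (·.1))).map (fun k =>
          (k, (l.foldl (fun d t => d.modify t.1 [] (· ++ [t.2])) PySem.Dict.empty :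
            PySem.Dict Int (List (Int × Int))).getD k []))).foldl (fun es kv =>
        let lst := PySem.List.sorted kv.2 (fun q : Int × Int => toLex q) false
        (PySem.List.pyRange 0 ((lst.length : Int) - 1) 1).foldl (fun es2 k =>
          let u := (PySem.List.pyGetD lst k (0, 0)).2
          let v := (PySem.List.pyGetD lst (k + 1) (0, 0)).2
          es2 ++ [(min u v, max u v)]) es) es
      = ((PySem.Set.ofList (l.map (·.1))).map (fun k =>
          (k, (l.foldl (fun d t => d.modify t.1 [] (· ++ [t.2])) PySem.Dict.empty :
            PySem.Dict Int (List (Int × Int))).getD k []))).foldl (fun es kv =>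
          es ++ (pvCp (PySem.List.sorted kv.2 pvLex2 false)).map (fun pr => pvEdge pr.1 pr.2)) es := by
        apply List.foldl_ext
        intro acc kv _
        exact hinner acc kv
    _ = es ++ pvAxisEdges (PySem.Set.ofList (l.map (·.1))) l := by
        rw [PySem.List.foldl_append_eq_flatMap]
        congr 1
        rw [List.flatMap_map]
        unfold pvAxisEdges
        apply List.flatMap_congr
        intro k _
        rw [hgetD k]
        rfl

theorem pv_axisB (l : List (Int × Int × Int)) (hnd : (l.map (·.2.2)).Nodup) :
    pvScanList (PySem.List.sorted l pvLex3 false)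
      = pvAxisEdges (PySem.List.sorted (PySem.Set.ofList (l.map (·.1))) (fun x => x) false) l := by
  rw [pv_sorted_structure l hnd]
  apply pv_scan_blocks
  · intro k hk
    rw [PySem.List.mem_sorted] at hk
    rw [PySem.Set.mem_ofList, List.mem_map] at hk
    obtain ⟨t, ht, rfl⟩ := hk
    intro hnil
    unfold pvSB at hnil
    rw [PySem.List.sorted_eq_nil_iff] at hnil
    have : t.2 ∈ pvBucket l t.1 := by
      unfold pvBucket
      exact List.mem_map_of_mem (List.mem_filter.2 ⟨ht, by simp⟩)
    rw [hnil] at this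
    exact absurd this (List.not_mem_nil)
  · exact PySem.List.sorted_ofList_pairwise_lt _

theorem pv_axis_perm (l : List (Int × Int × Int)) :
    (pvAxisEdges (PySem.Set.ofList (l.map (·.1))) l).Perm
      (pvAxisEdges (PySem.List.sorted (PySem.Set.ofList (l.map (·.1))) (fun x => x) false) l) :=
  (PySem.List.sorted_perm _ _ _).symm.flatMap_right _

theorem pv_sorted_ofList_eq_of_perm (xs ys : List (Int × Int)) (h : xs.Perm ys) :
    PySem.List.sorted (PySem.Set.ofList xs) (fun e : Int × Int => toLex e) false
      = PySem.List.sorted (PySem.Set.ofList ys) (fun e : Int × Int => toLex e) false := by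
  apply PySem.List.sorted_eq_sorted_of_perm
  · exact fun a b hab => by simpa using congrArg ofLex hab
  · rw [List.perm_ext_iff_of_nodup (PySem.Set.nodup_ofList _) (PySem.Set.nodup_ofList _)]
    intro a
    rw [PySem.Set.mem_ofList, PySem.Set.mem_ofList]
    exact ⟨fun ha => h.mem_iff.1 ha, fun ha => h.mem_iff.2 ha⟩

theorem pv_nodup_idx (points : List (Int × Int)) (f : Int × Int → Int × Int) :
    (((PySem.List.enumerate points).map (fun p => ((f p.2).1, (f p.2).2, p.1))).map (·.2.2)).Nodup := by
  rw [List.map_map]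
  have : ((PySem.List.enumerate points).map ((·.2.2) ∘ (fun p => ((f p.2).1, (f p.2).2, p.1))))
      = (PySem.List.enumerate points).map (·.1) := rfl
  rw [this, PySem.List.map_fst_enumerate]
  exact PySem.List.nodup_pyRange_one _ _

theorem pv_main (points : List (Int × Int)) :
    build_visibility_edges_py points = build_visibility_edges_py_alt points := by
  show (build_visibility_edges_py points) = _
  rw [show build_visibility_edges_py points = PySem.List.sorted (PySem.Set.ofList
      ((((PySem.List.enumerate points).foldl
          (fun d p => d.modify p.2.2 [] (· ++ [(p.2.1, p.1)])) PySem.Dict.empty :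
          PySem.Dict Int (List (Int × Int))).items).foldl (fun es kv =>
        let lst := PySem.List.sorted kv.2 (fun q : Int × Int => toLex q) false
        (PySem.List.pyRange 0 ((lst.length : Int) - 1) 1).foldl (fun es2 k =>
          let u := (PySem.List.pyGetD lst k (0, 0)).2
          let v := (PySem.List.pyGetD lst (k + 1) (0, 0)).2
          es2 ++ [(min u v, max u v)]) es)
        ((((PySem.List.enumerate points).foldl
          (fun d p => d.modify p.2.1 [] (· ++ [(p.2.2, p.1)])) PySem.Dict.empty :
          PySem.Dict Int (List (Int × Int))).items).foldl (fun es kv =>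
        let lst := PySem.List.sorted kv.2 (fun q : Int × Int => toLex q) false
        (PySem.List.pyRange 0 ((lst.length : Int) - 1) 1).foldl (fun es2 k =>
          let u := (PySem.List.pyGetD lst k (0, 0)).2
          let v := (PySem.List.pyGetD lst (k + 1) (0, 0)).2
          es2 ++ [(min u v, max u v)]) es) [])))
      (fun e : Int × Int => toLex e) false from rfl]
  rw [show build_visibility_edges_py_alt points = PySem.List.sorted
      (bScanVis (PySem.List.sorted ((PySem.List.enumerate points).map (fun p => (p.2.2, p.2.1, p.1)))
          (fun t : Int × Int × Int => toLex (t.1, toLex t.2)) false)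
        (bScanVis (PySem.List.sorted ((PySem.List.enumerate points).map (fun p => (p.2.1, p.2.2, p.1)))
          (fun t : Int × Int × Int => toLex (t.1, toLex t.2)) false) PySem.Set.empty))
      (fun e : Int × Int => toLex e) false from rfl]
  -- the two triple lists, rows and cols
  set rl := (PySem.List.enumerate points).map (fun p => (p.2.1, p.2.2, p.1)) with hrl
  set cl := (PySem.List.enumerate points).map (fun p => (p.2.2, p.2.1, p.1)) with hcl
  have hndr : (rl.map (·.2.2)).Nodup := pv_nodup_idx points (fun q => (q.1, q.2))
  have hndc : (cl.map (·.2.2)).Nodup := pv_nodup_idx points (fun q => (q.2, q.1))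

  -- A's dict folds are folds over rl / cl
  have hfoldr : (PySem.List.enumerate points).foldl
        (fun d p => d.modify p.2.1 [] (· ++ [(p.2.2, p.1)])) PySem.Dict.empty
      = rl.foldl (fun d t => d.modify t.1 [] (· ++ [t.2])) PySem.Dict.empty :=
    (List.foldl_map (f := fun p : Int × (Int × Int) => ((p.2.1, p.2.2, p.1) : Int × Int × Int))
      (g := fun (d : PySem.Dict Int (List (Int × Int))) (t : Int × Int × Int) =>
        d.modify t.1 [] (· ++ [t.2]))
      (l := PySem.List.enumerate points) (init := PySem.Dict.empty)).symm
  have hfoldc : (PySem.List.enumerate points).foldl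
        (fun d p => d.modify p.2.2 [] (· ++ [(p.2.1, p.1)])) PySem.Dict.empty
      = cl.foldl (fun d t => d.modify t.1 [] (· ++ [t.2])) PySem.Dict.empty :=
    (List.foldl_map (f := fun p : Int × (Int × Int) => ((p.2.2, p.2.1, p.1) : Int × Int × Int))
      (g := fun (d : PySem.Dict Int (List (Int × Int))) (t : Int × Int × Int) =>
        d.modify t.1 [] (· ++ [t.2]))
      (l := PySem.List.enumerate points) (init := PySem.Dict.empty)).symm
  rw [hfoldr, hfoldc, pv_axisA rl [], List.nil_append, pv_axisA cl (pvAxisEdges (PySem.Set.ofList (rl.map (·.1))) rl)]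
  -- B's scans
  rw [show (PySem.Set.empty : PySem.Set (Int × Int)) = [] from rfl]
  rw [pv_bScanVis_eq, pv_bScanVis_eq, PySem.Set.update_nil_left]
  rw [show PySem.Set.update (PySem.Set.ofList (pvScanList
      (PySem.List.sorted rl (fun t : Int × Int × Int => toLex (t.1, toLex t.2)) false)))
      (pvScanList (PySem.List.sorted cl (fun t : Int × Int × Int => toLex (t.1, toLex t.2)) false))
    = PySem.Set.ofList (pvScanList
        (PySem.List.sorted rl (fun t : Int × Int × Int => toLex (t.1, toLex t.2)) false)
      ++ pvScanList (PySem.List.sorted cl (fun t : Int × Int × Int => toLex (t.1, toLex t.2)) false))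
    from by rw [PySem.Set.ofList_append]]
  have hrB : pvScanList (PySem.List.sorted rl (fun t : Int × Int × Int => toLex (t.1, toLex t.2)) false)
      = pvAxisEdges (PySem.List.sorted (PySem.Set.ofList (rl.map (·.1))) (fun x => x) false) rl :=
    pv_axisB rl hndr
  have hcB : pvScanList (PySem.List.sorted cl (fun t : Int × Int × Int => toLex (t.1, toLex t.2)) false)
      = pvAxisEdges (PySem.List.sorted (PySem.Set.ofList (cl.map (·.1))) (fun x => x) false) cl :=
    pv_axisB cl hndc
  rw [hrB, hcB]
  apply pv_sorted_ofList_eq_of_perm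
  exact ((pv_axis_perm rl).append (pv_axis_perm cl))

-- ===== VERDICT (by name: the statement is the Claim_ definition above) =====
theorem build_visibility_edges_py_spec : Claim_equal_build_visibility_edges_py := by
  intro points _
  show build_visibility_edges_py points = build_visibility_edges_py_alt points
  exact pv_main points
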